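-- pv_equiv track=rewrite | github.com/dariazhl/amoc-v4-persona-age-experiments | amoc/admission/triplet_deduplicator.py | group_by_subject
-- ===== SOURCE A (Python) =====
-- from typing import List, Tuple, Dict, Any, Optional
--
-- def group_by_subject(
--     triplets: List[Tuple[str, str, str]]
-- ) -> Dict[str, List[int]]:
--     groups = {}
--     for i, (s, r, o) in enumerate(triplets):
--         s_norm = s.lower().strip()
--         groups.setdefault(s_norm, []).append(i)
--     return groups
-- ===== SOURCE B (Python) =====
-- def group_by_subject(triplets):
--     # dedup-then-collect: list the normalized subjects once, take the distinct
--     # keys in first-occurrence order, then gather each key's indices by a scan.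
--     norms = [s.lower().strip() for s, _, _ in triplets]
--     keys = list(dict.fromkeys(norms))
--     return {k: [i for i, x in enumerate(norms) if x == k] for k in keys}
-- ===== Notes on version B (the rewrite author's own statement) =====
-- stated objective: alternative
-- what changed: Replaces the single setdefault-append pass building the dict incrementally with a dedup-then-collect decomposition: compute the normalized-subject list once, take the distinct keys in first-occurrence order, and build each group's index list by a comprehension over the enumerated norms.
import Mathlib
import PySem

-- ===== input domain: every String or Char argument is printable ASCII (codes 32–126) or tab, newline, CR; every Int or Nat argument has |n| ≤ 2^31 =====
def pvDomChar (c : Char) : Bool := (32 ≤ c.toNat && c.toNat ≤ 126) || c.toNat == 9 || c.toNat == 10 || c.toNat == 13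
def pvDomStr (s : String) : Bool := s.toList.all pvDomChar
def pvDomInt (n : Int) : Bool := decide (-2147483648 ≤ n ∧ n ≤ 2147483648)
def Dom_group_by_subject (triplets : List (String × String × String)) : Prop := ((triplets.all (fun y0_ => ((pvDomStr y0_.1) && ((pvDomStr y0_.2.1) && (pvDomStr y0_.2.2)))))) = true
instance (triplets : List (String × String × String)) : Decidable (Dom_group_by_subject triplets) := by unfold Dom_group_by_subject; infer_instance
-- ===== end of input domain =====

-- B replaces A's incremental setdefault-append dict pass by a dedup-then-collect
-- decomposition (distinct keys first, then one index scan per key); alternative, not faster.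

-- s.lower().strip()
def pvNorm (s : String) : String := PySem.Str.strip (PySem.Str.lower s)

-- ===== PORT A =====
-- groups.setdefault(k, []).append(i) = groups[k] = groups.get(k, []) + [i] = Dict.modify
def group_by_subject (triplets : List (String × String × String)) : List (String × List Int) :=
  ((PySem.List.enumerate triplets 0).foldl
      (fun (g : PySem.Dict String (List Int)) p =>
        g.modify (pvNorm p.2.1) [] (fun l => l ++ [p.1]))
      PySem.Dict.empty).items

-- ===== PORT B =====
def group_by_subject_alt (triplets : List (String × String × String)) : List (String × List Int) :=
  let norms := triplets.map (fun t => pvNorm t.1)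
  let keys := PySem.List.dedup norms
  keys.map (fun k =>
    (k, ((PySem.List.enumerate norms 0).filter (fun p => p.2 == k)).map (·.1)))

-- ===== PRECONDITION & SPEC =====
def Spec_group_by_subject (triplets : List (String × String × String)) (out : List (String × List Int)) : Prop := out = group_by_subject_alt triplets
instance (triplets : List (String × String × String)) (out : List (String × List Int)) : Decidable (Spec_group_by_subject triplets out) := by unfold Spec_group_by_subject; infer_instance

-- ===== CLAIM (what is proved, stated in full; the proofs are below) =====
def Claim_equal_group_by_subject : Prop := ∀ (triplets : List (String × String × String)), Dom_group_by_subject triplets → Spec_group_by_subject triplets (group_by_subject triplets)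

-- ===== LEMMAS AND PROOFS =====

theorem enumerate_map {α β : Type} (f : α → β) (xs : List α) (s : Int) :
    PySem.List.enumerate (xs.map f) s
      = (PySem.List.enumerate xs s).map (fun p => (p.1, f p.2)) := by
  induction xs generalizing s with
  | nil => simp [PySem.List.enumerate_nil]
  | cons x xs ih => simp [PySem.List.enumerate_cons, ih]

theorem map_snd_comp_enumerate {α β : Type} (f : α → β) (xs : List α) (s : Int) :
    (PySem.List.enumerate xs s).map (fun p => f p.2) = xs.map f := by
  induction xs generalizing s with
  | nil => simp [PySem.List.enumerate_nil]
  | cons x xs ih => simp [PySem.List.enumerate_cons, ih]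

-- characterisation of A's grouping fold over an abstract (key, value) list
theorem grouped_items (l : List (String × Int)) :
    (l.foldl (fun (g : PySem.Dict String (List Int)) q =>
        g.modify q.1 [] (fun ls => ls ++ [q.2])) PySem.Dict.empty).items
      = (PySem.List.dedup (l.map (·.1))).map
          (fun k => (k, (l.filter (fun q => q.1 == k)).map (·.2))) := by
  have hkeys :
      (l.foldl (fun (g : PySem.Dict String (List Int)) q =>
        g.modify q.1 [] (fun ls => ls ++ [q.2])) PySem.Dict.empty).keys
        = PySem.List.dedup (l.map (·.1)) := by
    have hk := PySem.Dict.keys_foldl_modify_key l Prod.fst ([] : List Int)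
      (fun _ q ls => ls ++ [q.2]) PySem.Dict.empty
    rw [PySem.Dict.keys_empty, PySem.Set.update_nil_left] at hk
    rw [PySem.List.dedup_eq_ofList]
    exact hk
  have hnd : (l.foldl (fun (g : PySem.Dict String (List Int)) q =>
      g.modify q.1 [] (fun ls => ls ++ [q.2])) PySem.Dict.empty).keys.Nodup := by
    rw [hkeys]; exact PySem.List.nodup_dedup _
  rw [PySem.Dict.items_eq_map_keys _ hnd [], hkeys]
  apply List.map_congr_left
  intro k _
  rw [PySem.Dict.getD_foldl_modify_append, PySem.Dict.getD_empty]
  simp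

theorem group_by_subject_eq (triplets : List (String × String × String)) :
    group_by_subject triplets = group_by_subject_alt triplets := by
  have h := grouped_items
    ((PySem.List.enumerate triplets 0).map (fun p => (pvNorm p.2.1, p.1)))
  rw [List.foldl_map] at h
  unfold group_by_subject group_by_subject_alt
  refine h.trans ?_
  simp only [List.map_map, Function.comp_def]
  rw [map_snd_comp_enumerate (fun t => pvNorm t.1) triplets 0]
  apply List.map_congr_left
  intro k _
  rw [enumerate_map]
  simp [List.filter_map, List.map_map, Function.comp_def]

-- ===== VERDICT (by name: the statement is the Claim_ definition above) =====
theorem group_by_subject_spec : Claim_equal_group_by_subject := by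
  intro triplets _
  exact group_by_subject_eq triplets
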